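-- pv_equiv track=rewrite | github.com/yazinsai/offline-tarteel | scripts/build_phoneme_web_data.py | join_phonemes
-- ===== SOURCE A (Python) =====
-- def join_phonemes(raw: str) -> tuple[str, list[str]]:
--     """Convert raw phoneme string to joined word representation.
--
--     "b i s m i | a l l a h i" -> ("bismi allahi", ["bismi", "allahi"])
--     """
--     words = []
--     current_word_tokens = []
--
--     for token in raw.split():
--         if token == "|":
--             if current_word_tokens:
--                 words.append("".join(current_word_tokens))
--             current_word_tokens = []
--         else:
--             current_word_tokens.append(token)
--
--     if current_word_tokens:
--         words.append("".join(current_word_tokens))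
--
--     return " ".join(words), words
-- ===== SOURCE B (Python) =====
-- def join_phonemes(raw: str) -> tuple[str, list[str]]:
--     """Convert raw phoneme string to joined word representation.
--
--     Two-pointer run scan: skip "|" tokens, join each maximal run of
--     non-separator tokens directly via a slice (no accumulator/flush).
--     """
--     tokens = raw.split()
--     n = len(tokens)
--     words = []
--     i = 0
--     while i < n:
--         if tokens[i] == "|":
--             i += 1
--         else:
--             j = i
--             while j < n and tokens[j] != "|":
--                 j += 1
--             words.append("".join(tokens[i:j]))
--             i = j
--     return " ".join(words), words
-- ===== Notes on version B (the rewrite author's own statement) =====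
-- stated objective: alternative
-- what changed: Replaces A's incremental accumulate-and-flush loop over tokens with a two-pointer run scan: skip separator tokens, find the end of each maximal non-separator run, and join that slice directly into a word.
import Mathlib
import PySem

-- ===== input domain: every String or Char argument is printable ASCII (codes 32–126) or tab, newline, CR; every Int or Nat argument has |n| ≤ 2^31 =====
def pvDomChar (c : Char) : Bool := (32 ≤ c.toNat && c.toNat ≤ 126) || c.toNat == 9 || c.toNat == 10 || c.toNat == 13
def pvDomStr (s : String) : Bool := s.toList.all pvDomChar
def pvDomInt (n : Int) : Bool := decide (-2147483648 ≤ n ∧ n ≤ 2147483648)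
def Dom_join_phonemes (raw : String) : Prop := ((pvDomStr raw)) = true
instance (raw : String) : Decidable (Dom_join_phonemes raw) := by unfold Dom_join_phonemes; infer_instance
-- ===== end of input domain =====

-- B replaces A's accumulate-and-flush loop by a two-pointer run scan (same cost, different decomposition).

-- ===== PORT A =====
def join_phonemes (raw : String) : String × List String :=
  let st := (PySem.Str.split₀ raw).foldl
    (fun st token =>
      if token = "|" then
        (if st.2 ≠ [] then st.1 ++ [PySem.Str.join "" st.2] else st.1, ([] : List String))
      else (st.1, st.2 ++ [token]))
    ([], [])
  let words := if st.2 ≠ [] then st.1 ++ [PySem.Str.join "" st.2] else st.1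
  (PySem.Str.join " " words, words)

-- ===== PORT B =====
-- inner while: first index j' ≥ j with tokens[j'] = "|" (or tokens.length);
-- fuel only bounds the loop (tokens.length - j steps suffice), it changes no value
def pvFindSep (tokens : List String) (fuel j : Nat) : Nat :=
  match fuel with
  | 0 => j
  | f + 1 =>
    if h : j < tokens.length then
      if tokens[j] ≠ "|" then pvFindSep tokens f (j + 1) else j
    else j

-- outer while over index i (fuel likewise only bounds the loop)
def pvCollectGo (tokens : List String) (fuel i : Nat) : List String :=
  match fuel with
  | 0 => []
  | f + 1 =>
    if h : i < tokens.length then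
      if tokens[i] = "|" then pvCollectGo tokens f (i + 1)
      else
        let j := pvFindSep tokens (tokens.length - i) i
        PySem.Str.join "" (PySem.List.slice tokens (some (i : Int)) (some (j : Int))) ::
          pvCollectGo tokens f j
    else []

def join_phonemes_alt (raw : String) : String × List String :=
  let tokens := PySem.Str.split₀ raw
  let words := pvCollectGo tokens tokens.length 0
  (PySem.Str.join " " words, words)

-- ===== PRECONDITION & SPEC =====
def Spec_join_phonemes (raw : String) (out : String × List String) : Prop := out = join_phonemes_alt raw
instance (raw : String) (out : String × List String) : Decidable (Spec_join_phonemes raw out) := by unfold Spec_join_phonemes; infer_instance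

-- ===== CLAIM (what is proved, stated in full; the proofs are below) =====
def Claim_equal_join_phonemes : Prop := ∀ (raw : String), Dom_join_phonemes raw → Spec_join_phonemes raw (join_phonemes raw)

-- ===== LEMMAS AND PROOFS =====

-- common reference: structural run-partition of the token list
def pvG : List String → List String
  | [] => []
  | t :: ts =>
    if t = "|" then pvG ts
    else
      PySem.Str.join "" (t :: ts.takeWhile (· ≠ "|")) :: pvG (ts.dropWhile (· ≠ "|"))
termination_by ts => ts.length
decreasing_by
  · simp
  · have := List.length_dropWhile_le (p := (· ≠ "|")) (l := ts)
    simp only [List.length_cons]; omega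

theorem pv_dropWhile_drop (l : List String) :
    l.dropWhile (· ≠ "|") = l.drop ((l.takeWhile (· ≠ "|")).length) := by
  induction l with
  | nil => simp
  | cons x xs ih =>
    rw [List.takeWhile_cons, List.dropWhile_cons]
    by_cases hx : x = "|"
    · simp [hx]
    · rw [if_pos (by simp [hx]), if_pos (by simp [hx]), List.length_cons,
        List.drop_succ_cons]
      exact ih

theorem pvFindSep_eq (tokens : List String) (fuel j : Nat)
    (hf : tokens.length ≤ j + fuel) :
    pvFindSep tokens fuel j = j + ((tokens.drop j).takeWhile (· ≠ "|")).length := by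
  induction fuel generalizing j with
  | zero =>
    have : tokens.drop j = [] := List.drop_eq_nil_of_le (by omega)
    simp [pvFindSep, this]
  | succ f ih =>
    rw [pvFindSep]
    by_cases h : j < tokens.length
    · simp only [h, dif_pos]
      by_cases hne : tokens[j] = "|"
      · have hne' : ¬ (tokens[j] ≠ "|") := by simp [hne]
        rw [if_neg hne', List.drop_eq_getElem_cons h, List.takeWhile_cons]
        simp [hne]
      · rw [if_pos hne, ih (j + 1) (by omega), List.drop_eq_getElem_cons h,
          List.takeWhile_cons]
        simp [hne]
        omega
    · have : tokens.drop j = [] := List.drop_eq_nil_of_le (by omega)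
      simp [h, this]

theorem pvCollectGo_eq (tokens : List String) (fuel i : Nat)
    (hf : tokens.length ≤ i + fuel) :
    pvCollectGo tokens fuel i = pvG (tokens.drop i) := by
  induction fuel generalizing i with
  | zero =>
    have : tokens.drop i = [] := List.drop_eq_nil_of_le (by omega)
    simp [pvCollectGo, this, pvG]
  | succ f ih =>
    rw [pvCollectGo]
    by_cases h : i < tokens.length
    · simp only [h, dif_pos]
      by_cases hsep : tokens[i] = "|"
      · rw [if_pos hsep, ih (i + 1) (by omega), List.drop_eq_getElem_cons h, pvG]
        simp [hsep]
      · rw [if_neg hsep]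
        have hd : tokens.drop i = tokens[i] :: tokens.drop (i + 1) :=
          List.drop_eq_getElem_cons h
        have hj : pvFindSep tokens (tokens.length - i) i =
            i + ((tokens.drop i).takeWhile (· ≠ "|")).length :=
          pvFindSep_eq tokens (tokens.length - i) i (by omega)
        have htw : (tokens.drop i).takeWhile (· ≠ "|") =
            tokens[i] :: ((tokens.drop (i + 1)).takeWhile (· ≠ "|")) := by
          rw [hd, List.takeWhile_cons]; simp [hsep]
        have hdw : (tokens.drop i).dropWhile (· ≠ "|") =
            (tokens.drop (i + 1)).dropWhile (· ≠ "|") := by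
          rw [hd, List.dropWhile_cons]; simp [hsep]
        -- the slice tokens[i:j] is exactly the takeWhile run
        have hslice : PySem.List.slice tokens (some (i : Int))
              (some ((pvFindSep tokens (tokens.length - i) i : Nat) : Int)) =
            (tokens.drop i).takeWhile (· ≠ "|") := by
          rw [PySem.List.slice_natCast, hj]
          have he : i + ((tokens.drop i).takeWhile (· ≠ "|")).length - i =
              ((tokens.drop i).takeWhile (· ≠ "|")).length := by omega
          rw [he]
          exact (List.prefix_iff_eq_take.mp (List.takeWhile_prefix _)).symm
        have htwpos : 1 ≤ ((tokens.drop i).takeWhile (· ≠ "|")).length := by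
          rw [htw]; simp
        have hdwdrop : tokens.drop (pvFindSep tokens (tokens.length - i) i) =
            (tokens.drop i).dropWhile (· ≠ "|") := by
          rw [pv_dropWhile_drop, List.drop_drop, hj]
        rw [ih (pvFindSep tokens (tokens.length - i) i) (by omega), hslice, hdwdrop]
        conv_rhs => rw [hd, pvG]
        simp only [hsep, if_false]
        rw [htw, hdw]
    · have : tokens.drop i = [] := List.drop_eq_nil_of_le (by omega)
      simp [h, this, pvG]

-- A side: flush and fold
def pvFlush (ws cur : List String) : List String :=
  if cur ≠ [] then ws ++ [PySem.Str.join "" cur] else ws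

def pvStep (st : List String × List String) (token : String) : List String × List String :=
  if token = "|" then (pvFlush st.1 st.2, []) else (st.1, st.2 ++ [token])

def pvF (ts : List String) (ws cur : List String) : List String :=
  pvFlush (ts.foldl pvStep (ws, cur)).1 (ts.foldl pvStep (ws, cur)).2

theorem pvFlush_append (ws cur : List String) : pvFlush ws cur = ws ++ pvFlush [] cur := by
  unfold pvFlush; split <;> simp

theorem pvF_sep (t : String) (rest : List String) (ws cur : List String) (ht : t = "|") :
    pvF (t :: rest) ws cur = pvF rest (pvFlush ws cur) [] := by
  simp [pvF, pvStep, ht]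

theorem pvF_tok (t : String) (rest : List String) (ws cur : List String) (ht : ¬ t = "|") :
    pvF (t :: rest) ws cur = pvF rest ws (cur ++ [t]) := by
  simp [pvF, pvStep, ht]

theorem pvF_acc (ts : List String) (ws cur : List String) :
    pvF ts ws cur = ws ++ pvF ts [] cur := by
  induction ts generalizing ws cur with
  | nil =>
    simp only [pvF, List.foldl_nil]
    exact pvFlush_append ws cur
  | cons t rest ih =>
    by_cases ht : t = "|"
    · rw [pvF_sep t rest ws cur ht, pvF_sep t rest [] cur ht,
        ih (pvFlush ws cur) [], ih (pvFlush [] cur) [],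
        pvFlush_append ws cur, List.append_assoc]
    · rw [pvF_tok t rest ws cur ht, pvF_tok t rest [] cur ht]
      exact ih ws (cur ++ [t])

theorem pvF_eq_pvG (ts : List String) (cur : List String) :
    pvF ts [] cur =
      if cur = [] then pvG ts
      else PySem.Str.join "" (cur ++ ts.takeWhile (· ≠ "|")) :: pvG (ts.dropWhile (· ≠ "|")) := by
  induction ts generalizing cur with
  | nil =>
    simp only [pvF, List.foldl_nil, List.takeWhile_nil, List.dropWhile_nil]
    by_cases hc : cur = [] <;> simp [hc, pvFlush, pvG]
  | cons t rest ih =>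
    by_cases ht : t = "|"
    · rw [pvF_sep t rest [] cur ht, pvF_acc rest (pvFlush [] cur) []]
      have h2 : pvF rest [] [] = pvG rest := by simpa using ih []
      rw [h2]
      by_cases hc : cur = []
      · simp [hc, pvFlush, pvG, ht]
      · simp [hc, pvFlush, pvG, ht]
    · rw [pvF_tok t rest [] cur ht, ih (cur ++ [t])]
      simp only [List.append_ne_nil_of_right_ne_nil _ (by simp : ([t] : List String) ≠ []), if_false]
      by_cases hc : cur = []
      · simp [hc, pvG, ht]
      · simp [hc, ht, List.append_assoc]

theorem words_eq (raw : String) :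
    (let st := (PySem.Str.split₀ raw).foldl pvStep ([], [])
     if st.2 ≠ [] then st.1 ++ [PySem.Str.join "" st.2] else st.1) =
    pvCollectGo (PySem.Str.split₀ raw) (PySem.Str.split₀ raw).length 0 := by
  have hA : pvF (PySem.Str.split₀ raw) [] [] = pvG (PySem.Str.split₀ raw) := by
    simpa using pvF_eq_pvG (PySem.Str.split₀ raw) []
  have hB : pvCollectGo (PySem.Str.split₀ raw) (PySem.Str.split₀ raw).length 0 =
      pvG (PySem.Str.split₀ raw) := by
    simpa using pvCollectGo_eq (PySem.Str.split₀ raw) (PySem.Str.split₀ raw).length 0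
      (by omega)
  rw [hB, ← hA]
  rfl

-- ===== VERDICT (by name: the statement is the Claim_ definition above) =====
theorem join_phonemes_spec : Claim_equal_join_phonemes := by
  intro raw _
  show join_phonemes raw = join_phonemes_alt raw
  exact congrArg (fun ws => (PySem.Str.join " " ws, ws)) (words_eq raw)
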